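-- pv_equiv track=rewrite | github.com/fabian20ro/generator-rebus | generator/core/clue_family.py | _shared_root
-- ===== SOURCE A (Python) =====
-- def _shared_root(answer_stem: str, token_stem: str) -> bool:
--     if answer_stem == token_stem:
--         return True
--     min_len = min(len(answer_stem), len(token_stem))
--     if min_len < 4:
--         return False
--     shared = 0
--     for a_ch, b_ch in zip(answer_stem, token_stem):
--         if a_ch != b_ch:
--             break
--         shared += 1
--     return shared >= max(4, min_len - 1)
-- ===== SOURCE B (Python) =====
-- def _shared_root(answer_stem: str, token_stem: str) -> bool:
--     if answer_stem == token_stem: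
--         return True
--     min_len = min(len(answer_stem), len(token_stem))
--     if min_len < 4:
--         return False
--     threshold = max(4, min_len - 1)
--     return answer_stem[:threshold] == token_stem[:threshold]
-- ===== Notes on version B (the rewrite author's own statement) =====
-- stated objective: simpler
-- what changed: Replaces the character-counting zip loop with a direct prefix-slice comparison of length max(4, min_len-1), which is equivalent because that threshold never exceeds min_len.
import Mathlib
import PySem

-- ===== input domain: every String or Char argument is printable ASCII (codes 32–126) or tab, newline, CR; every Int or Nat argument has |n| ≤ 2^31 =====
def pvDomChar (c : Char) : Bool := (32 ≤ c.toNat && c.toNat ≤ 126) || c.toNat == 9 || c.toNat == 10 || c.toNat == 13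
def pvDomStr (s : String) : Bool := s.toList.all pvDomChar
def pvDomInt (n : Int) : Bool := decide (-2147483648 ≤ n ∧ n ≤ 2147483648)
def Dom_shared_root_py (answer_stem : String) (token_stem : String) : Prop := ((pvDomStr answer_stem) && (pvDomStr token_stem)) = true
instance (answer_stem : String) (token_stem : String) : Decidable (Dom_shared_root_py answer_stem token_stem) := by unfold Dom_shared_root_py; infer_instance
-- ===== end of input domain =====

-- B replaces A's character-counting loop with a direct prefix-slice comparison (objective: simpler).
-- ===== PORT A =====
-- loop 'for a_ch, b_ch in zip(...): if a_ch != b_ch: break; shared += 1' as structural recursion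
def pvSharedCount : List Char → List Char → Nat
  | a :: as, b :: bs => if a ≠ b then 0 else pvSharedCount as bs + 1
  | _, _ => 0

def shared_root_py (answer_stem : String) (token_stem : String) : Bool :=
  if answer_stem = token_stem then true
  else
    let min_len := min answer_stem.toList.length token_stem.toList.length
    if min_len < 4 then false
    else pvSharedCount answer_stem.toList token_stem.toList ≥ max 4 (min_len - 1)

-- ===== PORT B =====
def shared_root_py_alt (answer_stem : String) (token_stem : String) : Bool :=
  if answer_stem = token_stem then true
  else
    let min_len := min answer_stem.toList.length token_stem.toList.length
    if min_len < 4 then false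
    else
      let threshold := max 4 (min_len - 1)
      answer_stem.toList.take threshold = token_stem.toList.take threshold

-- ===== PRECONDITION & SPEC =====
def Spec_shared_root_py (answer_stem : String) (token_stem : String) (out : Bool) : Prop := out = shared_root_py_alt answer_stem token_stem
instance (answer_stem : String) (token_stem : String) (out : Bool) : Decidable (Spec_shared_root_py answer_stem token_stem out) := by unfold Spec_shared_root_py; infer_instance

-- ===== CLAIM (what is proved, stated in full; the proofs are below) =====
def Claim_equal_shared_root_py : Prop := ∀ (answer_stem : String) (token_stem : String), Dom_shared_root_py answer_stem token_stem → Spec_shared_root_py answer_stem token_stem (shared_root_py answer_stem token_stem)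

-- ===== LEMMAS AND PROOFS =====

-- ===== VERDICT (by name: the statement is the Claim_ definition above) =====
-- shared count ≥ k iff the length-k prefixes agree, provided k fits in both lists
theorem pvSharedCount_ge_iff (k : Nat) : ∀ (la lt : List Char), k ≤ la.length → k ≤ lt.length →
    (k ≤ pvSharedCount la lt ↔ la.take k = lt.take k) := by
  induction k with
  | zero => intro la lt _ _; simp
  | succ k ih =>
    intro la lt hla hlt
    match la, lt with
    | a :: as, b :: bs =>
      simp only [pvSharedCount]
      by_cases hab : a = b
      · subst hab
        rw [if_neg (by simp)]
        simp only [List.take_succ_cons, List.cons.injEq, true_and, Nat.succ_le_succ_iff]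
        exact ih as bs (by simpa using hla) (by simpa using hlt)
      · simp [hab, List.take_succ_cons]
    | [], _ => simp at hla
    | _ :: _, [] => simp at hlt

theorem shared_root_py_spec : Claim_equal_shared_root_py := by
  intro a t _
  unfold Spec_shared_root_py shared_root_py shared_root_py_alt
  by_cases he : a = t
  · simp [he]
  · simp only [if_neg he]
    set m := min a.toList.length t.toList.length with hm
    by_cases hlt : m < 4
    · simp [hlt]
    · simp only [if_neg hlt]
      have h4 : 4 ≤ m := Nat.le_of_not_lt hlt
      have hk : max 4 (m - 1) ≤ m := by omega
      have h1 : max 4 (m - 1) ≤ a.toList.length := le_trans hk (Nat.min_le_left _ _)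
      have h2 : max 4 (m - 1) ≤ t.toList.length := le_trans hk (Nat.min_le_right _ _)
      have := pvSharedCount_ge_iff (max 4 (m - 1)) a.toList t.toList h1 h2
      simp only [ge_iff_le, decide_eq_decide]
      exact this
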